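-- pv_equiv track=rewrite | github.com/JamesAUre/First-year-of-python | PythonSem1/untitled1/week6.py | greedy_items
-- ===== SOURCE A (Python) =====
-- def greedy_items(items,capacity):
--     greedylist = []
--     space = 0
--     while len(items) > 0:
--         bestIndex = best_item(items)
--         if space_left(items[bestIndex][0],space,capacity):
--             space+=items[bestIndex][0]
--             greedylist.append(items[bestIndex])
--         items.pop(bestIndex)
--     return greedylist
--
-- def compare_items(A,B):
--     if A[0] < B[0]:
--         return True
--     return False
--
-- def space_left(bestItem, space, capacity):
--     if bestItem + space <= capacity:
--         return True
--     return False
--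
-- def best_item(records):
--     bestvalue = 0
--     for i in range (0,len(records)):
--         if compare_items(records[i],records[bestvalue]):
--             bestvalue = i
--     return bestvalue
-- ===== SOURCE B (Python) =====
-- def greedy_items(items, capacity):
--     # Sort once by weight (stable, so equal weights keep the original order =
--     # A's first-minimum rule), then greedily take what fits in a single pass.
--     # Like A, it leaves the input list empty (items.clear()).
--     greedylist = []
--     space = 0
--     for item in sorted(items, key=lambda it: it[0]):
--         if item[0] + space <= capacity:
--             greedylist.append(item)
--             space += item[0]
--     items.clear()
--     return greedylist
-- ===== Notes on version B (the rewrite author's own statement) =====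
-- stated objective: alternative
-- what changed: A repeatedly scans the remaining list for the first minimum-weight item and pops it (selection style); B sorts the list once by weight (stable sort keeps A's first-minimum tie-breaking) and makes a single greedy pass, clearing the input list to reproduce A's emptying side effect.
import Mathlib
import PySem

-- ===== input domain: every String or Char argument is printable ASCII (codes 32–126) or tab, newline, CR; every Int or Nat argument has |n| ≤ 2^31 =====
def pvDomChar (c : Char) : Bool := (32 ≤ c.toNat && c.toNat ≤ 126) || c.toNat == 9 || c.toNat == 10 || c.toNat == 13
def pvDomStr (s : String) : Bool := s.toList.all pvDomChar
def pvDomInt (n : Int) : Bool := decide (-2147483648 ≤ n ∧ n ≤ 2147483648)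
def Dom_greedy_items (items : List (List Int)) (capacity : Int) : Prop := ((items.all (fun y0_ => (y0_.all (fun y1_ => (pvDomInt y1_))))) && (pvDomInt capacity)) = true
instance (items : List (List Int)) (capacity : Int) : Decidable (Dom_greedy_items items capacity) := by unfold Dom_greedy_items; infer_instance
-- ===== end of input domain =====

-- B sorts once by weight (stable) and greedily scans, instead of A's repeated first-minimum
-- scan-and-pop; equal return values are proved (both Pythons also empty the input list in place).

-- ===== PORT A =====
-- compare_items(A, B): A[0] < B[0]; item[0] is headD 0, exact on Pre_ (nonempty item lists)
def pvCompareItems (A B : List Int) : Bool := decide (A.headD 0 < B.headD 0)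

-- best_item(records): fold over range(0, len(records)) keeping the first strict-minimum index
def pvBestItem (records : List (List Int)) : Nat :=
  (List.range records.length).foldl
    (fun bestvalue i =>
      if pvCompareItems (records.getD i []) (records.getD bestvalue []) then i else bestvalue) 0

-- termination fact the loop below cites: best_item's index is in range on a nonempty list
theorem pvBestItem_lt (records : List (List Int)) (h : records ≠ []) :
    pvBestItem records < records.length := by
  have hgen : ∀ (L : List Nat) (b : Nat), b < records.length → (∀ i ∈ L, i < records.length) →
      (L.foldl (fun bestvalue i =>
        if pvCompareItems (records.getD i []) (records.getD bestvalue []) then i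
        else bestvalue) b) < records.length := by
    intro L
    induction L with
    | nil => intro b hb _; simpa using hb
    | cons x t ih =>
        intro b hb hm
        simp only [List.foldl_cons]
        apply ih
        · split
          · exact hm x (by simp)
          · exact hb
        · intro i hi; exact hm i (by simp [hi])
  unfold pvBestItem
  exact hgen _ 0 (by cases records with | nil => exact absurd rfl h | cons a t => simp)
    (fun i hi => List.mem_range.mp hi)

-- space_left(best, space, capacity) inlined as the test  best + space ≤ capacity
def pvGreedyLoop (capacity : Int) (items : List (List Int)) (space : Int)
    (greedylist : List (List Int)) : List (List Int) :=
  if h : items = [] then greedylist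
  else
    let b := pvBestItem items
    let best := items.getD b []
    if best.headD 0 + space ≤ capacity then
      pvGreedyLoop capacity (items.eraseIdx b) (space + best.headD 0) (greedylist ++ [best])
    else
      pvGreedyLoop capacity (items.eraseIdx b) space greedylist
termination_by items.length
decreasing_by
  all_goals
    have hb := pvBestItem_lt items h
    simp [List.length_eraseIdx, hb]
    omega

def greedy_items (items : List (List Int)) (capacity : Int) : List (List Int) :=
  pvGreedyLoop capacity items 0 []

-- ===== PORT B =====
-- sorted(items, key=lambda it: it[0]) then one greedy pass with (greedylist, space) state
def greedy_items_alt (items : List (List Int)) (capacity : Int) : List (List Int) :=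
  ((PySem.List.sorted items (fun it => it.headD 0)).foldl
      (fun (st : List (List Int) × Int) item =>
        if item.headD 0 + st.2 ≤ capacity then (st.1 ++ [item], st.2 + item.headD 0) else st)
      ([], 0)).1

-- ===== PRECONDITION & SPEC =====
-- Pre_ excludes exactly the inputs containing an empty item list, on which Python A raises
-- IndexError (items[bestIndex][0]); B raises there too (its sort key it[0]).
def Pre_greedy_items (items : List (List Int)) (capacity : Int) : Prop :=
  ∀ l ∈ items, l ≠ []
instance (items : List (List Int)) (capacity : Int) : Decidable (Pre_greedy_items items capacity) := by
  unfold Pre_greedy_items; infer_instance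

def pvWitness_greedy_items : List (List Int) × Int := ([[2], [1, 7], [3]], 4)

def Spec_greedy_items (items : List (List Int)) (capacity : Int) (out : List (List Int)) : Prop :=
  out = greedy_items_alt items capacity
instance (items : List (List Int)) (capacity : Int) (out : List (List Int)) :
    Decidable (Spec_greedy_items items capacity out) := by unfold Spec_greedy_items; infer_instance

-- ===== CLAIM (what is proved, stated in full; the proofs are below) =====
def Claim_equal_greedy_items : Prop := ∀ (items : List (List Int)) (capacity : Int),
  Dom_greedy_items items capacity → Pre_greedy_items items capacity →
  Spec_greedy_items items capacity (greedy_items items capacity)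

-- ===== LEMMAS AND PROOFS =====

-- insertion with strict / non-strict comparison on the weight key
def pvIns (x : List Int) (acc : List (List Int)) : List (List Int) :=
  PySem.List.insertBy (fun a b => decide (a.headD 0 < b.headD 0)) x acc
def pvInsLe (x : List Int) (acc : List (List Int)) : List (List Int) :=
  PySem.List.insertBy (fun a b => decide (a.headD 0 ≤ b.headD 0)) x acc

-- the greedy pass as structural recursion (B's fold, accumulator removed)
def pvProc (capacity : Int) : List (List Int) → Int → List (List Int)
  | [], _ => []
  | x :: t, s =>
      if x.headD 0 + s ≤ capacity then x :: pvProc capacity t (s + x.headD 0)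
      else pvProc capacity t s

theorem pvIns_comm (x y : List Int) : ∀ acc,
    pvIns y (pvInsLe x acc) = pvInsLe x (pvIns y acc) := by
  intro acc
  induction acc with
  | nil =>
      simp only [pvIns, pvInsLe, PySem.List.insertBy]
      split_ifs with h1 h2 h2 <;> simp_all <;> omega
  | cons z t ih =>
      simp only [pvIns, pvInsLe, PySem.List.insertBy] at *
      split_ifs with h1 h2 h2 h3 h3 <;> simp_all [PySem.List.insertBy] <;> split_ifs <;>
        simp_all <;> omega

theorem pvFoldl_insLe (x : List Int) : ∀ (xs : List (List Int)) (acc : List (List Int)),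
    xs.foldl (fun a y => pvIns y a) (pvInsLe x acc)
      = pvInsLe x (xs.foldl (fun a y => pvIns y a) acc) := by
  intro xs
  induction xs with
  | nil => intro acc; rfl
  | cons y t ih => intro acc; simp only [List.foldl_cons, pvIns_comm, ih]

theorem pvSorted_cons (x : List Int) (xs : List (List Int)) :
    PySem.List.sorted (x :: xs) (fun it => it.headD 0)
      = pvInsLe x (PySem.List.sorted xs (fun it => it.headD 0)) := by
  rw [PySem.List.sorted_eq_foldl_insertBy, PySem.List.sorted_eq_foldl_insertBy]
  simp only [List.foldl_cons]
  have h0 : PySem.List.insertBy (fun a b => decide ((a.headD 0 : Int) < b.headD 0)) x []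
      = pvInsLe x [] := rfl
  rw [show (fun (acc : List (List Int)) (x : List Int) =>
        PySem.List.insertBy (fun a b => decide ((a.headD 0 : Int) < b.headD 0)) x acc)
      = fun a y => pvIns y a from rfl, h0, pvFoldl_insLe]

theorem pvInsLe_eq_cons (x : List Int) (L : List (List Int))
    (h : ∀ y ∈ L, x.headD 0 ≤ y.headD 0) : pvInsLe x L = x :: L := by
  cases L with
  | nil => rfl
  | cons z t =>
      simp only [pvInsLe, PySem.List.insertBy]
      rw [if_pos (by simpa using h z (by simp))]

-- the selection step: the first minimum-weight element heads the stable sort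
theorem pvSel : ∀ (l : List (List Int)) (b : Nat) (hb : b < l.length),
    (∀ i (h : i < l.length), (l[b]'hb).headD 0 ≤ (l[i]'h).headD 0) →
    (∀ i (h : i < b), (l[b]'hb).headD 0 < (l[i]'(h.trans hb)).headD 0) →
    PySem.List.sorted l (fun it => it.headD 0)
      = (l[b]'hb) :: PySem.List.sorted (l.eraseIdx b) (fun it => it.headD 0) := by
  intro l
  induction l with
  | nil => intro b hb; exact absurd hb (by simp)
  | cons x xs ih =>
      intro b hb hmin hfirst
      cases b with
      | zero =>
          rw [pvSorted_cons, pvInsLe_eq_cons]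
          · simp
          · intro y hy
            rw [PySem.List.mem_sorted] at hy
            obtain ⟨i, hi, rfl⟩ := List.getElem_of_mem hy
            simpa using hmin (i + 1) (by simpa using hi)
      | succ k =>
          have hk : k < xs.length := by simpa using hb
          have hrec := ih k hk
            (fun i h => by simpa using hmin (i + 1) (by simpa using h))
            (fun i h => by simpa using hfirst (i + 1) (by simpa using h))
          rw [pvSorted_cons, hrec]
          have hlt : (xs[k]'hk).headD 0 < x.headD 0 := by
            simpa using hfirst 0 (Nat.succ_pos k)
          simp only [pvInsLe, PySem.List.insertBy]
          rw [if_neg (by simpa using not_le.mpr hlt)]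
          rw [show PySem.List.insertBy (fun a b => decide ((a.headD 0 : Int) ≤ b.headD 0)) x
                (PySem.List.sorted (xs.eraseIdx k) (fun it => it.headD 0))
              = pvInsLe x (PySem.List.sorted (xs.eraseIdx k) (fun it => it.headD 0)) from rfl,
            ← pvSorted_cons]
          simp

-- best_item as a function of how many indices have been scanned
def pvBestFold (l : List (List Int)) (n : Nat) : Nat :=
  (List.range n).foldl
    (fun bestvalue i =>
      if pvCompareItems (l.getD i []) (l.getD bestvalue []) then i else bestvalue) 0

theorem pvBestFold_succ (l : List (List Int)) (n : Nat) :
    pvBestFold l (n + 1)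
      = if pvCompareItems (l.getD n []) (l.getD (pvBestFold l n) []) then n
        else pvBestFold l n := by
  unfold pvBestFold
  rw [List.range_succ, List.foldl_append]
  simp

theorem pvBestFold_spec (l : List (List Int)) (hne : l ≠ []) : ∀ n, n ≤ l.length →
    pvBestFold l n < l.length ∧
    (∀ i, i < n →
      ((l.getD (pvBestFold l n) []).headD 0 : Int) ≤ (l.getD i []).headD 0) ∧
    (∀ i, i < pvBestFold l n →
      ((l.getD (pvBestFold l n) []).headD 0 : Int) < (l.getD i []).headD 0) := by
  intro n
  induction n with
  | zero =>
      intro _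
      have h0 : pvBestFold l 0 = 0 := rfl
      refine ⟨?_, ?_, ?_⟩
      · simpa [h0] using List.length_pos_of_ne_nil hne
      · intro i hi; omega
      · intro i hi; rw [h0] at hi; omega
  | succ n ihn =>
      intro hn1
      obtain ⟨ihb, ihmin, ihfirst⟩ := ihn (by omega)
      rw [pvBestFold_succ]
      simp only [pvCompareItems, decide_eq_true_eq]
      split_ifs with hc
      · refine ⟨by omega, ?_, ?_⟩
        · intro i hi
          rcases (by omega : i < n ∨ i = n) with h' | h'
          · exact le_of_lt (lt_of_lt_of_le hc (ihmin i h'))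
          · subst h'; exact le_refl _
        · intro i hi
          exact lt_of_lt_of_le hc (ihmin i hi)
      · refine ⟨ihb, ?_, ihfirst⟩
        intro i hi
        rcases (by omega : i < n ∨ i = n) with h' | h'
        · exact ihmin i h'
        · subst h'; exact not_lt.mp hc

-- best_item's full specification: in range, minimal, and strictly below every earlier weight
theorem pvBestItem_spec (l : List (List Int)) (hne : l ≠ []) :
    pvBestItem l < l.length ∧
    (∀ i (h : i < l.length),
        ((l[pvBestItem l]'(pvBestItem_lt l hne)).headD 0 : Int) ≤ (l[i]'h).headD 0) ∧
    (∀ i (h : i < pvBestItem l),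
        ((l[pvBestItem l]'(pvBestItem_lt l hne)).headD 0 : Int)
          < (l[i]'(h.trans (pvBestItem_lt l hne))).headD 0) := by
  have hpv : pvBestItem l = pvBestFold l l.length := rfl
  obtain ⟨hb, hmin, hfirst⟩ := pvBestFold_spec l hne l.length le_rfl
  rw [← hpv] at hb hmin hfirst
  refine ⟨hb, ?_, ?_⟩
  · intro i h
    have := hmin i h
    rwa [List.getD_eq_getElem _ _ hb, List.getD_eq_getElem _ _ h] at this
  · intro i h
    have := hfirst i h
    rwa [List.getD_eq_getElem _ _ hb,
      List.getD_eq_getElem _ _ (h.trans (pvBestItem_lt l hne))] at this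

-- A's loop computes B's greedy pass over the stable sort
theorem pvLoop_eq (capacity : Int) : ∀ (N : Nat) (items : List (List Int)) (space : Int)
    (acc : List (List Int)), items.length ≤ N →
    pvGreedyLoop capacity items space acc
      = acc ++ pvProc capacity (PySem.List.sorted items (fun it => it.headD 0)) space := by
  intro N
  induction N with
  | zero =>
      intro items space acc hlen
      have : items = [] := List.eq_nil_of_length_eq_zero (Nat.le_zero.mp hlen)
      subst this
      rw [pvGreedyLoop]
      simp [PySem.List.sorted_eq_foldl_insertBy, pvProc]
  | succ N ih =>
      intro items space acc hlen
      by_cases hni : items = []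
      · subst hni
        rw [pvGreedyLoop]
        simp [PySem.List.sorted_eq_foldl_insertBy, pvProc]
      · obtain ⟨hb, hmin, hfirst⟩ := pvBestItem_spec items hni
        have hsel := pvSel items (pvBestItem items) hb hmin hfirst
        have hget : items.getD (pvBestItem items) [] = items[pvBestItem items]'hb :=
          List.getD_eq_getElem _ _ hb
        have hlen' : (items.eraseIdx (pvBestItem items)).length ≤ N := by
          rw [List.length_eraseIdx]
          simp only [hb, if_pos]
          omega
        rw [pvGreedyLoop, dif_neg hni, hsel]
        simp only [pvProc, hget]
        split_ifs with hc
        · rw [ih _ _ _ hlen']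
          simp
        · rw [ih _ _ _ hlen']

-- B's fold equals the structural greedy pass
theorem pvFold_eq_proc (capacity : Int) : ∀ (L : List (List Int)) (s : Int)
    (acc : List (List Int)),
    (L.foldl (fun (st : List (List Int) × Int) item =>
        if item.headD 0 + st.2 ≤ capacity then (st.1 ++ [item], st.2 + item.headD 0) else st)
      (acc, s)).1 = acc ++ pvProc capacity L s := by
  intro L
  induction L with
  | nil => intro s acc; simp [pvProc]
  | cons x t ih =>
      intro s acc
      simp only [List.foldl_cons, pvProc]
      split_ifs with h
      · rw [ih]; simp
      · rw [ih]

-- ===== VERDICT (by name: the statement is the Claim_ definition above) =====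
theorem greedy_items_spec : Claim_equal_greedy_items := by
  intro items capacity _ _
  unfold Spec_greedy_items greedy_items greedy_items_alt
  rw [pvLoop_eq capacity items.length items 0 [] le_rfl,
    pvFold_eq_proc capacity _ 0 []]
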